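-- pv_equiv track=rewrite | github.com/tdnguyen6/leetcode | 902._Numbers_At_Most_N_Given_Digit_Set/main.py | solve
-- ===== SOURCE A (Python) =====
-- import functools
--
-- def solve(*args):
--     digits, n = args
--     ld = len(digits)
--     ln = len(n)
--     ld_pow_i = [1] * ln
--     for i in range(1, ln):
--         ld_pow_i[i] = ld_pow_i[i - 1] * ld
--
--     eq = [False] * ln
--     sm = [0] * ln
--
--     for i in range(ln):
--         for j in range(ld):
--             if n[i] == digits[j]:
--                 eq[i] = True
--             elif n[i] > digits[j]:
--                 sm[i] += 1
--
--     ans = functools.reduce(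
--         lambda a, b: a + b, ld_pow_i[1:]) if ln > 1 else 0  # first digit = 0
--
--     for i in range(ln):
--         ans += sm[i] * ld_pow_i[-(i + 1)]
--         if not eq[i]:
--             break
--         elif i == ln - 1:
--             ans += 1
--
--     return ans
-- ===== SOURCE B (Python) =====
-- def solve(*args):
--     digits, n = args
--     if not n:
--         return 0
--     ld = len(digits)
--     # fold the string right-to-left: acc = count of ld-ary strings over `digits`
--     # of the suffix's length that are <= that suffix; p = ld ** (chars consumed)
--     acc, p = 1, 1
--     for c in reversed(n):
--         acc = sum(1 for d in digits if d < c) * p + (acc if c in digits else 0)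
--         p *= ld
--     return acc + sum(ld ** k for k in range(1, len(n)))
-- ===== Notes on version B (the rewrite author's own statement) =====
-- stated objective: alternative
-- what changed: B replaces A's precomputed power/eq/sm tables and left-to-right loop with early break by a single right-to-left fold over n carrying (count-so-far, running power), with no tables, no indexing and no early exit.
import Mathlib
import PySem

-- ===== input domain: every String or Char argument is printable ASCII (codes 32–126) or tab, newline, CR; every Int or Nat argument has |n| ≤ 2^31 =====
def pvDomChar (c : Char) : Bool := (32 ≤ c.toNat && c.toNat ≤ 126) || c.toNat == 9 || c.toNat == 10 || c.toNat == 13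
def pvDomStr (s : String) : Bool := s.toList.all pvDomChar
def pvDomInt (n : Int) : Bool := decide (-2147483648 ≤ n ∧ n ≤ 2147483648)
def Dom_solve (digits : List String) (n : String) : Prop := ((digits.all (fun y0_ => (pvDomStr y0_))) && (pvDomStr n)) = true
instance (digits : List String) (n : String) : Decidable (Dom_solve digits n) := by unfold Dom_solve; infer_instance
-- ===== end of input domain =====

-- B folds n right-to-left with a (count, power) accumulator instead of A's precomputed
-- tables and left-to-right loop with break; objective: alternative (same asymptotic cost).

-- ===== PORT A =====
-- the loop 'for i in range(1, ln): ld_pow_i[i] = ld_pow_i[i-1] * ld', carrying the previous cell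
def powListA (ld : Int) : Nat → Int → List Int
  | 0, _ => []
  | k + 1, prev => (prev * ld) :: powListA ld k (prev * ld)

-- the inner 'for j in range(ld)' loop updating (eq[i], sm[i]); same branch order as A
def eqSmA (c : Char) (ds : List (List Char)) (p : Bool × Int) : Bool × Int :=
  ds.foldl (fun p d =>
    if [c] = d then (true, p.2)
    else if d < [c] then (p.1, p.2 + 1)
    else p) p

-- A's final loop: walk (eq[i], sm[i]) pairs with ld_pow_i[-(i+1)] read from the reversed list
def loopA : List (Bool × Int) → List Int → Int → Int
  | [], _, ans => ans
  | (e, s) :: rest, pows, ans =>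
    let ans := ans + s * pows.headD 0
    if !e then ans
    else if rest.isEmpty then ans + 1
    else loopA rest pows.tail ans

def solve (digits : List String) (n : String) : Int :=
  let ds := digits.map String.toList
  let ld : Int := digits.length
  let ncs := n.toList
  let ln := ncs.length
  let ld_pow_i : List Int := if ln = 0 then [] else 1 :: powListA ld (ln - 1) 1
  let eqsm := ncs.map (fun c => eqSmA c ds (false, 0))
  let ans : Int :=
    if ln > 1 then ((ld_pow_i.drop 1).tail).foldl (· + ·) ((ld_pow_i.drop 1).headD 0)
    else 0
  loopA eqsm ld_pow_i.reverse ans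

-- ===== PORT B =====
-- B's single loop body: 'acc = (#digits < c) * p + (acc if c in digits else 0); p *= ld'
def stepB (ds : List (List Char)) (ld : Int) (st : Int × Int) (c : Char) : Int × Int :=
  (((ds.filter (fun d => decide (d < [c]))).length : Int) * st.2 +
    (if ds.contains [c] then st.1 else 0), st.2 * ld)

def solve_alt (digits : List String) (n : String) : Int :=
  let ncs := n.toList
  if ncs.isEmpty then 0
  else
    let ds := digits.map String.toList
    let ld : Int := digits.length
    (ncs.reverse.foldl (stepB ds ld) (1, 1)).1 +
      ((List.range ncs.length).drop 1).foldl (fun a k => a + ld ^ k) 0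

-- ===== PRECONDITION & SPEC =====
def Spec_solve (digits : List String) (n : String) (out : Int) : Prop := out = solve_alt digits n
instance (digits : List String) (n : String) (out : Int) : Decidable (Spec_solve digits n out) := by unfold Spec_solve; infer_instance

-- ===== CLAIM (what is proved, stated in full; the proofs are below) =====
def Claim_equal_solve : Prop := ∀ (digits : List String) (n : String), Dom_solve digits n → Spec_solve digits n (solve digits n)

-- ===== LEMMAS AND PROOFS =====
-- the suffix count both programs compute, written as structural recursion (proof helper)
def gSuf (ds : List (List Char)) (ld : Int) : List Char → Int
  | [] => 1
  | c :: rest =>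
    ((ds.filter (fun d => decide (d < [c]))).length : Int) * ld ^ rest.length +
      (if ds.contains [c] then gSuf ds ld rest else 0)

theorem eqSmA_eq (c : Char) (ds : List (List Char)) (e : Bool) (s : Int) :
    eqSmA c ds (e, s) = (e || ds.contains [c],
      s + ((ds.filter (fun d => decide (d < [c]))).length : Int)) := by
  induction ds generalizing e s with
  | nil => simp [eqSmA]
  | cons d ds ih =>
    simp only [eqSmA, List.foldl_cons] at *
    by_cases h1 : [c] = d
    · subst h1
      rw [if_pos rfl, ih]
      simp
    · by_cases h2 : d < [c]
      · rw [if_neg h1, if_pos h2, ih]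
        simp [h1, h2]
        ring
      · rw [if_neg h1, if_neg h2, ih]
        simp [h1, h2]

theorem loopA_cons (e : Bool) (s : Int) (ps : List (Bool × Int)) (p : Int) (pows : List Int) (ans : Int) :
    loopA ((e, s) :: ps) (p :: pows) ans =
      if !e then ans + s * p
      else if ps.isEmpty then ans + s * p + 1
      else loopA ps pows (ans + s * p) := by
  simp [loopA]

-- B's reversed foldl computes (gSuf cs, ld ^ |cs|)
theorem foldB_eq (ds : List (List Char)) (ld : Int) : ∀ (cs : List Char),
    cs.reverse.foldl (stepB ds ld) (1, 1) = (gSuf ds ld cs, ld ^ cs.length) := by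
  intro cs
  rw [List.foldl_reverse]
  induction cs with
  | nil => simp [gSuf]
  | cons c rest ih =>
    rw [List.foldr_cons, ih]
    simp [stepB, gSuf, pow_succ]

-- A's final loop computes ans + gSuf on a nonempty list
theorem loopA_eq_gSuf (ds : List (List Char)) (ld : Int) : ∀ (cs : List Char) (ans : Int),
    cs ≠ [] →
    loopA (cs.map (fun c => eqSmA c ds (false, 0)))
      ((List.range cs.length).map (fun j => ld ^ j)).reverse ans
      = ans + gSuf ds ld cs := by
  intro cs
  induction cs with
  | nil => intro ans h; exact absurd rfl h
  | cons c rest ih =>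
    intro ans _
    have hrev : ((List.range (c :: rest).length).map (fun j => ld ^ j)).reverse
        = ld ^ rest.length :: ((List.range rest.length).map (fun j => ld ^ j)).reverse := by
      simp [List.range_succ]
    rw [List.map_cons, hrev, eqSmA_eq, loopA_cons]
    by_cases hm : [c] ∈ ds
    · cases rest with
      | nil => simp [gSuf, hm]; ring
      | cons c2 r2 =>
        have hne : ((c2 :: r2).map (fun c => eqSmA c ds (false, 0))).isEmpty = false := by simp
        simp only [hm, zero_add, Bool.false_or, List.contains_eq_mem, decide_true,
          Bool.not_true, Bool.false_eq_true, if_false, hne]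
        rw [gSuf, if_pos (by simpa using hm), ih _ (by simp)]
        ring
    · simp [gSuf, hm]

theorem foldl_map_pow (ld : Int) (L : List Nat) :
    ((L.map (fun j => ld ^ j)).tail).foldl (· + ·) ((L.map (fun j => ld ^ j)).headD 0)
      = L.foldl (fun a k => a + ld ^ k) 0 := by
  cases L with
  | nil => simp
  | cons a t => simp [List.foldl_map]

theorem powList_full (ld : Int) (k : Nat) :
    (1 : Int) :: powListA ld k 1 = (List.range (k + 1)).map (fun j => ld ^ j) := by
  induction k with
  | zero => simp [powListA]
  | succ k ih =>
    rw [List.range_succ_eq_map]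
    have : ∀ (m : Nat) (p : Int), powListA ld m p = (List.range m).map (fun j => p * ld ^ (j + 1)) := by
      intro m
      induction m with
      | zero => intro p; rfl
      | succ m ihm =>
        intro p
        rw [List.range_succ_eq_map]
        simp only [powListA, ihm, List.map_cons, List.map_map]
        congr 1
        · ring
        · apply List.map_congr_left
          intro j _
          simp only [Function.comp, pow_succ]
          ring
    rw [this, List.range_succ_eq_map]
    simp [List.map_map, Function.comp, pow_succ, mul_comm]

theorem solve_eq_alt (digits : List String) (n : String) : solve digits n = solve_alt digits n := by
  unfold solve solve_alt
  cases hn : n.toList with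
  | nil => simp [loopA]
  | cons c cs =>
    simp only [List.isEmpty_cons, List.length_cons, Nat.add_sub_cancel,
      if_neg (by omega : ¬(cs.length + 1 = 0)), Bool.false_eq_true, if_false]
    rw [powList_full, foldB_eq]
    have hans : (if cs.length + 1 > 1 then
          List.foldl (fun x1 x2 => x1 + x2)
            ((List.drop 1 (List.map (fun j => ((digits.length : Int)) ^ j) (List.range (cs.length + 1)))).headD 0)
            (List.drop 1 (List.map (fun j => ((digits.length : Int)) ^ j) (List.range (cs.length + 1)))).tail
        else 0)
        = List.foldl (fun a k => a + ((digits.length : Int)) ^ k) 0 (List.drop 1 (List.range (cs.length + 1))) := by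
      by_cases h : cs.length + 1 > 1
      · rw [if_pos h, ← List.map_drop, foldl_map_pow]
      · have h0 : cs.length = 0 := by omega
        rw [if_neg h, h0]
        simp
    rw [hans]
    have hl := loopA_eq_gSuf (digits.map String.toList) (digits.length : Int) (c :: cs)
      (List.foldl (fun a k => a + ((digits.length : Int)) ^ k) 0 (List.drop 1 (List.range (cs.length + 1)))) (by simp)
    simp only [List.length_cons] at hl
    rw [hl]
    simp [add_comm]

-- ===== VERDICT (by name: the statement is the Claim_ definition above) =====
theorem solve_spec : Claim_equal_solve := by
  intro digits n _
  exact solve_eq_alt digits n
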